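-- pv_equiv track=rewrite | github.com/junsoopooh/Studying_Algorithm | week02/junsu/3.py | solution3
-- ===== SOURCE A (Python) =====
-- def solution3(n):
--     while True:
--         if not n % 2:
--             n //= 2
--         else:
--             break
--     if n <= 3:
--         dp = [0, 1, 1, 2]
--         return dp[n]
--     dp = []
--     for i in range(n + 1):
--         dp.append(i)
--     dp[2] = 1
--     dp[3] = 2
--
--     for i in range(4, n + 1):
--         if i % 2:
--             dp[i] = dp[i - 1] + 1
--         else:
--             dp[i] = dp[i // 2]
--     return dp[n]
-- ===== SOURCE B (Python) =====
-- def solution3(n):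
--     count = 0
--     while n > 0:
--         if n % 2:
--             n -= 1
--             count += 1
--         else:
--             n //= 2
--     return count
-- ===== Notes on version B (the rewrite author's own statement) =====
-- stated objective: faster
-- what changed: Replaces the O(n) dp-array fill (after stripping 2-factors) with a single O(log n) halve/decrement loop that counts the decrements directly.
-- outside the precondition, e.g. on solution3(0): A does not finish within the time limit, B returns 0; on solution3(-5): A raises IndexError, B returns 0; on solution3(-1): A returns 2, B returns 0
import Mathlib
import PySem

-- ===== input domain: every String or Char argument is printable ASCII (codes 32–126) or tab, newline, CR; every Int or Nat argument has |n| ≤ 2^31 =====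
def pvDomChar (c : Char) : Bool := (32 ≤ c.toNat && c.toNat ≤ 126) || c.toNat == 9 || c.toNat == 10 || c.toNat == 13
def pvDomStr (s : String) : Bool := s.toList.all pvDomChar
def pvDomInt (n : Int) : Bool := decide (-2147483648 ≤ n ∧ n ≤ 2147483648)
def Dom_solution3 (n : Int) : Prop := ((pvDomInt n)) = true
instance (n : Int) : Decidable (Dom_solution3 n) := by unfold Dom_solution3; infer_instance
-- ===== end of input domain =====

-- B replaces A's dp-array fill with a single halve/decrement counting loop (measured faster on large n).


-- ===== PORT A =====
-- the initial 'while True' loop stripping factors of 2; the '1 ≤ n' guard only makes the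
-- recursion total (Python diverges at n = 0 and keeps halving negative evens; outside Pre_)
def stripA (n : Int) : Int :=
  if h : 1 ≤ n ∧ PySem.Int.mod n 2 = 0 then stripA (PySem.Int.floordiv n 2) else n
termination_by n.toNat
decreasing_by
  rcases h with ⟨h1, h2⟩
  rw [PySem.Int.floordiv_eq_ediv_of_pos (by omega)]
  rw [PySem.Int.mod_eq_emod_of_pos (by omega)] at h2
  omega

def solution3 (n : Int) : Int :=
  let m := stripA n
  if m ≤ 3 then
    -- dp = [0, 1, 1, 2]; return dp[m]  (.getD 0 only pads the IndexError cases, outside Pre_)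
    ((PySem.List.pyGet? ([0, 1, 1, 2] : List Int) m).getD 0)
  else
    -- for i in range(n + 1): dp.append(i)
    let dp0 : Array Int := (PySem.List.pyRange 0 (m + 1) 1).foldl (fun a i => a.push i) #[]
    -- dp[2] = 1; dp[3] = 2  (indices in range since m > 3)
    let dp1 := (dp0.setIfInBounds 2 1).setIfInBounds 3 2
    -- for i in range(4, n + 1): …  (all indices here are positive, so .toNat is exact)
    let dp := (PySem.List.pyRange 4 (m + 1) 1).foldl
      (fun a i =>
        if PySem.Int.mod i 2 ≠ 0 then a.setIfInBounds i.toNat (a.getD (i - 1).toNat 0 + 1)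
        else a.setIfInBounds i.toNat (a.getD (PySem.Int.floordiv i 2).toNat 0)) dp1
    dp.getD m.toNat 0

-- ===== PORT B =====
-- while n > 0: if n % 2: n -= 1; count += 1 else: n //= 2
def altLoop (n : Int) (count : Int) : Int :=
  if h : 0 < n then
    if PySem.Int.mod n 2 ≠ 0 then altLoop (n - 1) (count + 1)
    else altLoop (PySem.Int.floordiv n 2) count
  else count
termination_by n.toNat
decreasing_by
  · omega
  · rw [PySem.Int.floordiv_eq_ediv_of_pos (by omega)]
    omega

def solution3_alt (n : Int) : Int := altLoop n 0

-- ===== PRECONDITION & SPEC =====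
-- Pre_ excludes n ≤ 0: there A diverges (n = 0), raises IndexError (odd part ≤ -5), or
-- returns via accidental negative-index wraparound into [0,1,1,2] (odd part -1 or -3).
def Pre_solution3 (n : Int) : Prop := 1 ≤ n
instance (n : Int) : Decidable (Pre_solution3 n) := by unfold Pre_solution3; infer_instance
def pvWitness_solution3 : Int := (12)

def Spec_solution3 (n : Int) (out : Int) : Prop := out = solution3_alt n
instance (n : Int) (out : Int) : Decidable (Spec_solution3 n out) := by unfold Spec_solution3; infer_instance

-- ===== CLAIM (what is proved, stated in full; the proofs are below) =====
def Claim_equal_solution3 : Prop := ∀ (n : Int), Dom_solution3 n → Pre_solution3 n → Spec_solution3 n (solution3 n)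

-- ===== LEMMAS AND PROOFS =====

-- bit-count of an even positive number equals that of its half
lemma bc_even (n : Int) (h : 0 < n) (he : n % 2 = 0) :
    PySem.Int.bitCount n = PySem.Int.bitCount (n / 2) := by
  have h1 := PySem.Int.bitCount_of_pos h
  rw [PySem.Int.mod_eq_emod_of_pos (by norm_num), PySem.Int.floordiv_eq_ediv_of_pos (by norm_num), he] at h1
  simpa using h1

-- bit-count of an odd positive number is one more than that of its predecessor
lemma bc_odd (n : Int) (h : 0 < n) (ho : n % 2 = 1) :
    PySem.Int.bitCount n = PySem.Int.bitCount (n - 1) + 1 := by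
  have h1 := PySem.Int.bitCount_of_pos h
  rw [PySem.Int.mod_eq_emod_of_pos (by norm_num), PySem.Int.floordiv_eq_ediv_of_pos (by norm_num), ho] at h1
  by_cases h2 : n = 1
  · subst h2; decide
  · have h3 := PySem.Int.bitCount_of_pos (show (0:Int) < n - 1 by omega)
    rw [PySem.Int.mod_eq_emod_of_pos (by norm_num), PySem.Int.floordiv_eq_ediv_of_pos (by norm_num)] at h3
    have h4 : (n - 1) % 2 = 0 := by omega
    have h5 : (n - 1) / 2 = n / 2 := by omega
    rw [h4, h5] at h3
    simp at h3
    omega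

-- B's loop adds the bit count of n (the number of decrement steps) to the accumulator
lemma altLoop_eq (k : Nat) : ∀ (n c : Int), 0 ≤ n → n.toNat = k →
    altLoop n c = c + (PySem.Int.bitCount n : Int) := by
  induction k using Nat.strong_induction_on with
  | _ k ih =>
    intro n c hn hk
    by_cases h : 0 < n
    · rw [altLoop, dif_pos h]
      by_cases ho : PySem.Int.mod n 2 ≠ 0
      · rw [if_pos ho]
        have hom : n % 2 = 1 := by
          rw [PySem.Int.mod_eq_emod_of_pos (by norm_num)] at ho; omega
        rw [ih (n - 1).toNat (by omega) (n - 1) (c + 1) (by omega) rfl]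
        rw [bc_odd n h hom]; push_cast; ring
      · rw [if_neg ho]
        push Not at ho
        have hem : n % 2 = 0 := by
          rw [PySem.Int.mod_eq_emod_of_pos (by norm_num)] at ho; exact ho
        rw [PySem.Int.floordiv_eq_ediv_of_pos (by norm_num)]
        rw [ih (n / 2).toNat (by omega) (n / 2) c (by omega) rfl]
        rw [bc_even n h hem]
    · rw [altLoop, dif_neg h]
      have h0 : n = 0 := by omega
      subst h0; simp

-- A's stripping loop returns an odd positive number with the same bit count
lemma stripA_props (k : Nat) : ∀ (n : Int), 1 ≤ n → n.toNat = k →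
    1 ≤ stripA n ∧ stripA n % 2 = 1 ∧
      PySem.Int.bitCount (stripA n) = PySem.Int.bitCount n := by
  induction k using Nat.strong_induction_on with
  | _ k ih =>
    intro n hn hk
    rw [stripA]
    by_cases h : 1 ≤ n ∧ PySem.Int.mod n 2 = 0
    · rw [dif_pos h]
      have hem : n % 2 = 0 := by
        have := h.2
        rwa [PySem.Int.mod_eq_emod_of_pos (by norm_num)] at this
      rw [PySem.Int.floordiv_eq_ediv_of_pos (by norm_num)]
      obtain ⟨p1, p2, p3⟩ := ih (n / 2).toNat (by omega) (n / 2) (by omega) rfl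
      exact ⟨p1, p2, by rw [p3, ← bc_even n (by omega) hem]⟩
    · rw [dif_neg h]
      have hom : n % 2 = 1 := by
        by_contra hcon
        have : n % 2 = 0 := by omega
        exact h ⟨hn, by rwa [PySem.Int.mod_eq_emod_of_pos (by norm_num)]⟩
      exact ⟨hn, hom, rfl⟩

-- loop invariant of A's dp fill: after processing range(4, 4+t), entry i holds bitCount i
lemma fold_inv (f : Array Int → Int → Array Int)
    (hf : f = fun a i =>
      if PySem.Int.mod i 2 ≠ 0 then a.setIfInBounds i.toNat (a.getD (i - 1).toNat 0 + 1)
      else a.setIfInBounds i.toNat (a.getD (PySem.Int.floordiv i 2).toNat 0))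
    (m : Int) (hm : 4 ≤ m) (a0 : Array Int)
    (hs : a0.size = (m + 1).toNat)
    (h0 : ∀ i : Nat, i < 4 → a0.getD i 0 = (PySem.Int.bitCount (i : Int) : Int)) :
    ∀ t : Nat, 4 + (t : Int) ≤ m + 1 →
      ((PySem.List.pyRange 4 (4 + (t : Int)) 1).foldl f a0).size = (m + 1).toNat ∧
      ∀ i : Nat, (i : Int) < 4 + (t : Int) →
        ((PySem.List.pyRange 4 (4 + (t : Int)) 1).foldl f a0).getD i 0
          = (PySem.Int.bitCount (i : Int) : Int) := by
  intro t
  induction t with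
  | zero =>
    intro _
    rw [show (4 + ((0 : Nat) : Int)) = 4 by norm_num,
        PySem.List.pyRange_one_eq_nil (le_refl 4)]
    refine ⟨hs, ?_⟩
    intro i hi
    exact h0 i (by exact_mod_cast hi)
  | succ t iht =>
    intro ht
    have hcast : (4 + ((t + 1 : Nat) : Int)) = (4 + (t : Int)) + 1 := by push_cast; ring
    rw [hcast, PySem.List.pyRange_one_succ_right (by omega), List.foldl_append]
    obtain ⟨ihs, ihv⟩ := iht (by push_cast at ht ⊢; omega)
    set a := (PySem.List.pyRange 4 (4 + (t : Int)) 1).foldl f a0 with ha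
    simp only [List.foldl_cons, List.foldl_nil]
    rw [hf]
    simp only []
    set j : Int := 4 + (t : Int) with hjdef
    have hj0 : 0 < j := by omega
    have hjm : j ≤ m := by push_cast at ht; omega
    have hjsz : j.toNat < a.size := by rw [ihs]; omega
    have hmodeq : PySem.Int.mod j 2 = j % 2 := PySem.Int.mod_eq_emod_of_pos (by norm_num)
    -- the value written at index j equals bitCount j, in both parity branches
    have hwrite : (if PySem.Int.mod j 2 ≠ 0 then a.setIfInBounds j.toNat (a.getD (j - 1).toNat 0 + 1)
        else a.setIfInBounds j.toNat (a.getD (PySem.Int.floordiv j 2).toNat 0))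
        = a.setIfInBounds j.toNat (PySem.Int.bitCount j : Int) := by
      by_cases hp : j % 2 = 0
      · rw [if_neg (by rw [hmodeq]; omega)]
        rw [PySem.Int.floordiv_eq_ediv_of_pos (by norm_num)]
        have h1 : ((j / 2).toNat : Int) = j / 2 := by omega
        rw [ihv (j / 2).toNat (by omega)]
        rw [h1, ← bc_even j hj0 hp]
      · have hp1 : j % 2 = 1 := by omega
        rw [if_pos (by rw [hmodeq]; omega)]
        have h1 : ((j - 1).toNat : Int) = j - 1 := by omega
        rw [ihv (j - 1).toNat (by omega), h1]
        rw [bc_odd j hj0 hp1]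
        push_cast
        ring_nf
    rw [hwrite]
    constructor
    · rw [Array.size_setIfInBounds, ihs]
    · intro i hi
      rw [Array.getD_eq_getD_getElem?, Array.getElem?_setIfInBounds]
      by_cases hij : j.toNat = i
      · rw [if_pos hij, if_pos hjsz]
        have : (i : Int) = j := by omega
        rw [this]
        rfl
      · rw [if_neg hij, ← Array.getD_eq_getD_getElem?]
        exact ihv i (by omega)

-- A returns the bit count of n on every positive n
lemma solution3_eq_bitCount (n : Int) (h : 1 ≤ n) :
    solution3 n = (PySem.Int.bitCount n : Int) := by
  obtain ⟨p1, p2, p3⟩ := stripA_props n.toNat n h rfl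
  rw [← p3]
  simp only [solution3]
  by_cases hle : stripA n ≤ 3
  · rw [if_pos hle]
    have hm13 : stripA n = 1 ∨ stripA n = 3 := by omega
    rcases hm13 with h1 | h1 <;> rw [h1] <;> decide
  · rw [if_neg hle]
    have hm4 : 4 ≤ stripA n := by omega
    set m := stripA n with hmdef
    set dp0 : Array Int := (PySem.List.pyRange 0 (m + 1) 1).foldl (fun a i => a.push i) #[] with hdp0
    set dp1 := (dp0.setIfInBounds 2 1).setIfInBounds 3 2 with hdp1
    have hdp0eq : dp0 = (PySem.List.pyRange 0 (m + 1) 1).toArray := by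
      rw [hdp0]; simp
    have hs1 : dp1.size = (m + 1).toNat := by
      rw [hdp1, Array.size_setIfInBounds, Array.size_setIfInBounds, hdp0eq]
      simp [PySem.List.length_pyRange_one]
    have h0 : ∀ i : Nat, i < 4 → dp1.getD i 0 = (PySem.Int.bitCount (i : Int) : Int) := by
      intro i hi
      have hic : i < ((m + 1) - 0).toNat := by omega
      have hget0 : dp0[i]? = some (0 + (i : Int)) := by
        rw [hdp0eq]
        simp only [List.getElem?_toArray, PySem.List.getElem?_pyRange_one, if_pos hic]
      have hs0 : dp0.size = (m + 1).toNat := by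
        rw [hdp0eq]; simp [PySem.List.length_pyRange_one]
      have hsz2 : 2 < dp0.size := by omega
      have hsz3 : 3 < (dp0.setIfInBounds 2 1).size := by
        rw [Array.size_setIfInBounds]; omega
      rw [hdp1, Array.getD_eq_getD_getElem?, Array.getElem?_setIfInBounds,
          Array.getElem?_setIfInBounds]
      interval_cases i
      · rw [if_neg (by omega), if_neg (by omega), hget0]; decide
      · rw [if_neg (by omega), if_neg (by omega), hget0]; decide
      · rw [if_neg (by omega), if_pos rfl, if_pos hsz2]; decide
      · rw [if_pos rfl, if_pos hsz3]; decide
    have key := fold_inv (fun a i =>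
        if PySem.Int.mod i 2 ≠ 0 then a.setIfInBounds i.toNat (a.getD (i - 1).toNat 0 + 1)
        else a.setIfInBounds i.toNat (a.getD (PySem.Int.floordiv i 2).toNat 0)) rfl
      m hm4 dp1 hs1 h0 (m - 3).toNat (by omega)
    have hb : (4 + (((m - 3).toNat : Nat) : Int)) = m + 1 := by omega
    rw [hb] at key
    have hfin := key.2 m.toNat (by omega)
    rw [show ((m.toNat : Nat) : Int) = m by omega] at hfin
    exact hfin

-- ===== VERDICT (by name: the statement is the Claim_ definition above) =====
theorem solution3_spec : Claim_equal_solution3 := by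
  intro n _ hp
  unfold Pre_solution3 at hp
  unfold Spec_solution3 solution3_alt
  rw [altLoop_eq n.toNat n 0 (by omega) rfl, solution3_eq_bitCount n hp]
  omega
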